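-- pv_equiv track=rewrite | github.com/ztmtoosm-project/ztmtoosm-django | koordynacje/views.py | dfs
-- ===== SOURCE A (Python) =====
-- def dfs(current, visited, level, levels, graph):
--     if current in visited:
--         return level
--     visited.add(current)
--     if current in graph:
--         for k in graph[current]:
--             level = dfs(k, visited, level, levels, graph)
--     level = level+1
--     levels[current] = level
--     return level
-- ===== SOURCE B (Python) =====
-- def dfs(current, visited, level, levels, graph):
--     # Iterative DFS with an explicit (node, phase) stack instead of recursion.
--     stack = [(current, False)]
--     while stack:
--         node, post = stack.pop()
--         if post:
--             level += 1
--             levels[node] = level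
--         elif node not in visited:
--             visited.add(node)
--             stack.append((node, True))
--             if node in graph:
--                 for k in reversed(graph[node]):
--                     stack.append((k, False))
--     return level
-- ===== Notes on version B (the rewrite author's own statement) =====
-- stated objective: alternative
-- what changed: The recursive DFS is replaced by an iterative traversal over an explicit stack of (node, enter/post) entries: visited is marked when an enter entry is popped, children are pushed in reverse, and the post-order level counter is updated when a post entry is popped.
import Mathlib
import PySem

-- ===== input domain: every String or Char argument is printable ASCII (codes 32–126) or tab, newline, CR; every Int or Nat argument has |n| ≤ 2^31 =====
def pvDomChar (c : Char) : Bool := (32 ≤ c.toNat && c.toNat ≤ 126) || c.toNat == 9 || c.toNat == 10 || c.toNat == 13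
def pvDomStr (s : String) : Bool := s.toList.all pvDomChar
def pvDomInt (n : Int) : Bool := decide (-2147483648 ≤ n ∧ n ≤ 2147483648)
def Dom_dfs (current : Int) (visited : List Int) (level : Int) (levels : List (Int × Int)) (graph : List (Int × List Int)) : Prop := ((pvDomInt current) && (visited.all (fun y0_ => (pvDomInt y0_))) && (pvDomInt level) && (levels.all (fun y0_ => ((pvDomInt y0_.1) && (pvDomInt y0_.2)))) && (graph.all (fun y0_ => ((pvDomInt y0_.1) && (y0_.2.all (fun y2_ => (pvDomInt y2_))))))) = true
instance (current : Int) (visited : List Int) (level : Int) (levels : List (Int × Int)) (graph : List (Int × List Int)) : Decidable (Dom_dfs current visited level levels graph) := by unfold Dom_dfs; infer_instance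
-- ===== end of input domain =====

-- B replaces A's recursive DFS by an iterative explicit-stack traversal (same return value; both
-- Pythons mutate `visited` and `levels` identically in place — the theorem below is about the return value).

-- ===== PORT A =====
-- A's recursion is transliterated as the mutual pair dfsCore (one call of Python dfs) / dfsList
-- (its `for k in graph[current]` loop); the returned triple is (level, visited, levels).
-- dfsMu and its lemmas are the termination measure the ports cite in `decreasing_by`.
def dfsMu (graph : PySem.Dict Int (List Int)) (v : PySem.Set Int) : Nat :=
  (graph.keys.filter (fun k => decide (k ∉ v))).length

theorem pvFilterLenLt {l : List Int} {p q : Int → Bool} (hpq : ∀ a, p a = true → q a = true)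
    {x : Int} (hx : x ∈ l) (hqx : q x = true) (hpx : p x = false) :
    (l.filter p).length < (l.filter q).length := by
  induction l with
  | nil => cases hx
  | cons a t ih =>
    have hle : (t.filter p).length ≤ (t.filter q).length :=
      List.Sublist.length_le (List.monotone_filter_right t (fun a ha => hpq a ha))
    rcases List.mem_cons.1 hx with rfl | hmem
    · simp only [List.filter, hpx, hqx, List.length_cons]
      omega
    · by_cases hpa : p a = true
      · simp only [List.filter, hpa, hpq a hpa, List.length_cons]
        exact Nat.succ_lt_succ (ih hmem)
      · simp only [Bool.not_eq_true] at hpa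
        by_cases hqa : q a = true
        · simp only [List.filter, hpa, hqa, List.length_cons]
          exact Nat.lt_succ_of_lt (ih hmem)
        · simp only [Bool.not_eq_true] at hqa
          simp only [List.filter, hpa, hqa]
          exact ih hmem

theorem pvContainsFalse (v : List Int) (x : Int) :
    PySem.Set.contains v x = false ↔ x ∉ v := by
  simp [PySem.Set.contains]

theorem dfsMu_add_le (g : PySem.Dict Int (List Int)) (v : PySem.Set Int) (x : Int) :
    dfsMu g (PySem.Set.add v x) ≤ dfsMu g v := by
  unfold PySem.Set.add
  split
  · exact le_refl _
  · unfold dfsMu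
    apply List.Sublist.length_le
    apply List.monotone_filter_right
    intro a ha
    simp only [decide_eq_true_eq, List.mem_append, List.mem_singleton] at ha ⊢
    intro hmem; exact ha (Or.inl hmem)

theorem dfsMu_add_lt (g : PySem.Dict Int (List Int)) (v : PySem.Set Int) (x : Int)
    (hx : PySem.Set.contains v x = false) (hk : g.contains x = true) :
    dfsMu g (PySem.Set.add v x) < dfsMu g v := by
  unfold dfsMu PySem.Set.add
  rw [hx]
  simp only [Bool.false_eq_true, if_false]
  apply pvFilterLenLt (x := x)
  · intro a ha
    simp only [decide_eq_true_eq, List.mem_append, List.mem_singleton] at ha ⊢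
    intro hmem; exact ha (Or.inl hmem)
  · exact (PySem.Dict.contains_iff_mem_keys g x).1 hk
  · simpa using (pvContainsFalse v x).1 hx
  · simp

theorem dfsMu_add_eq_of_not_key (g : PySem.Dict Int (List Int)) (v : PySem.Set Int) (x : Int)
    (hk : g.contains x = false) :
    dfsMu g (PySem.Set.add v x) = dfsMu g v := by
  unfold dfsMu PySem.Set.add
  split
  · rfl
  · congr 1
    apply List.filter_congr
    intro k hkmem
    have hne : k ≠ x := by
      intro h; subst h
      rw [(PySem.Dict.contains_iff_mem_keys g k).2 hkmem] at hk
      cases hk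
    simp [hne]

mutual
def dfsCore (graph : PySem.Dict Int (List Int)) (current : Int) (visited : PySem.Set Int)
    (level : Int) (levels : PySem.Dict Int Int) :
    Int × {v : PySem.Set Int // dfsMu graph v ≤ dfsMu graph visited} × PySem.Dict Int Int :=
  if h : PySem.Set.contains visited current = true then (level, ⟨visited, le_refl _⟩, levels)
  else
    if hg : graph.contains current = true then
      let r := dfsList graph ((graph.get? current).getD []) (PySem.Set.add visited current) level levels
      (r.1 + 1, ⟨r.2.1.val, le_trans r.2.1.property (dfsMu_add_le graph visited current)⟩,
       r.2.2.insert current (r.1 + 1))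
    else
      (level + 1, ⟨PySem.Set.add visited current, dfsMu_add_le graph visited current⟩,
       levels.insert current (level + 1))
  termination_by (dfsMu graph visited, 0, 0)
  decreasing_by
    exact Prod.Lex.left _ _ (dfsMu_add_lt graph visited current (by simpa using h) hg)

def dfsList (graph : PySem.Dict Int (List Int)) (ks : List Int) (visited : PySem.Set Int)
    (level : Int) (levels : PySem.Dict Int Int) :
    Int × {v : PySem.Set Int // dfsMu graph v ≤ dfsMu graph visited} × PySem.Dict Int Int :=
  match ks with
  | [] => (level, ⟨visited, le_refl _⟩, levels)
  | k :: rest =>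
    let r := dfsCore graph k visited level levels
    let r2 := dfsList graph rest r.2.1.val r.1 r.2.2
    (r2.1, ⟨r2.2.1.val, le_trans r2.2.1.property r.2.1.property⟩, r2.2.2)
  termination_by (dfsMu graph visited, 1, ks.length)
  decreasing_by
    · exact Prod.Lex.right _ (Prod.Lex.left _ _ (by omega))
    · rcases Nat.lt_or_eq_of_le r.2.1.property with hlt | heq
      · exact Prod.Lex.left _ _ hlt
      · rw [heq]; exact Prod.Lex.right _ (Prod.Lex.right _ (by simp))
end


-- ===== PORT B =====
-- Source B's while-loop over the explicit (node, phase) stack, transliterated as tail recursion.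
def stackWeight (stack : List (Int × Bool)) : Nat :=
  (stack.map (fun e => if e.2 then 1 else 2)).sum

def dfsLoop (graph : PySem.Dict Int (List Int)) (stack : List (Int × Bool))
    (visited : PySem.Set Int) (level : Int) (levels : PySem.Dict Int Int) : Int :=
  match stack with
  | [] => level
  | (node, post) :: rest =>
    if post then dfsLoop graph rest visited (level + 1) (levels.insert node (level + 1))
    else if h : PySem.Set.contains visited node = true then dfsLoop graph rest visited level levels
    else
      if hg : graph.contains node = true then
        dfsLoop graph
          (((graph.get? node).getD []).reverse.foldl (fun st k => (k, false) :: st)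
            ((node, true) :: rest)) (PySem.Set.add visited node) level levels
      else dfsLoop graph ((node, true) :: rest) (PySem.Set.add visited node) level levels
  termination_by (dfsMu graph visited, stackWeight stack)
  decreasing_by
    · exact Prod.Lex.right _ (by simp [stackWeight, *])
    · exact Prod.Lex.right _ (by simp [stackWeight, *])
    · exact Prod.Lex.left _ _ (dfsMu_add_lt graph visited node (by simpa using h) hg)
    · rw [dfsMu_add_eq_of_not_key graph visited node (by simpa using hg)]
      exact Prod.Lex.right _ (by simp [stackWeight, *])


def dfs (current : Int) (visited : List Int) (level : Int) (levels : List (Int × Int))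
    (graph : List (Int × List Int)) : Int :=
  (dfsCore (PySem.Dict.mk graph) current visited level (PySem.Dict.mk levels)).1

def dfs_alt (current : Int) (visited : List Int) (level : Int) (levels : List (Int × Int))
    (graph : List (Int × List Int)) : Int :=
  dfsLoop (PySem.Dict.mk graph) [(current, false)] visited level (PySem.Dict.mk levels)


-- ===== PRECONDITION & SPEC =====
def Spec_dfs (current : Int) (visited : List Int) (level : Int) (levels : List (Int × Int)) (graph : List (Int × List Int)) (out : Int) : Prop := out = dfs_alt current visited level levels graph
instance (current : Int) (visited : List Int) (level : Int) (levels : List (Int × Int)) (graph : List (Int × List Int)) (out : Int) : Decidable (Spec_dfs current visited level levels graph out) := by unfold Spec_dfs; infer_instance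

-- ===== CLAIM (what is proved, stated in full; the proofs are below) =====
def Claim_equal_dfs : Prop := ∀ (current : Int) (visited : List Int) (level : Int) (levels : List (Int × Int)) (graph : List (Int × List Int)), Dom_dfs current visited level levels graph → Spec_dfs current visited level levels graph (dfs current visited level levels graph)

-- ===== LEMMAS AND PROOFS =====
theorem pvPush (ks : List Int) (base : List (Int × Bool)) :
    ks.reverse.foldl (fun st k => (k, false) :: st) base
      = ks.map (fun k => (k, false)) ++ base := by
  induction ks generalizing base with
  | nil => rfl
  | cons k rest ih =>
    simp only [List.reverse_cons, List.foldl_append, List.foldl_cons, List.foldl_nil, List.map_cons]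
    rw [ih]
    rfl

theorem pvCoreLoop (graph : PySem.Dict Int (List Int)) (current : Int) (visited : PySem.Set Int)
    (level : Int) (levels : PySem.Dict Int Int) :
    ∀ rest, dfsLoop graph ((current, false) :: rest) visited level levels
      = dfsLoop graph rest (dfsCore graph current visited level levels).2.1.val
          (dfsCore graph current visited level levels).1
          (dfsCore graph current visited level levels).2.2 := by
  refine dfsCore.induct graph
    (motive1 := fun c v l lv => ∀ rest, dfsLoop graph ((c, false) :: rest) v l lv
      = dfsLoop graph rest (dfsCore graph c v l lv).2.1.val (dfsCore graph c v l lv).1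
          (dfsCore graph c v l lv).2.2)
    (motive2 := fun ks v l lv => ∀ rest, dfsLoop graph (ks.map (fun k => (k, false)) ++ rest) v l lv
      = dfsLoop graph rest (dfsList graph ks v l lv).2.1.val (dfsList graph ks v l lv).1
          (dfsList graph ks v l lv).2.2)
    ?_ ?_ ?_ ?_ ?_ current visited level levels
  · intro c v l lv h rest
    conv_lhs => rw [dfsLoop.eq_def]
    rw [dfsCore.eq_def]
    simp only [Bool.false_eq_true, if_false, dif_pos h]
  · intro c v l lv h hg ih2 rest
    conv_lhs => rw [dfsLoop.eq_def]
    simp only [Bool.false_eq_true, if_false, dif_neg h, dif_pos hg]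
    rw [pvPush, ih2 ((c, true) :: rest)]
    conv_lhs => rw [dfsLoop.eq_def]
    rw [dfsCore.eq_def]
    simp only [dif_neg h, dif_pos hg]
    simp
  · intro c v l lv h hg rest
    conv_lhs => rw [dfsLoop.eq_def]
    simp only [Bool.false_eq_true, if_false, dif_neg h, dif_neg hg]
    conv_lhs => rw [dfsLoop.eq_def]
    rw [dfsCore.eq_def]
    simp only [dif_neg h, dif_neg hg]
    simp
  · intro v l lv rest
    rw [dfsList.eq_def]
    simp
  · intro v l lv k rest' r ih1 ih2 ih2' rest
    simp only [List.map_cons, List.cons_append]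
    rw [ih1, ih2' rest]
    conv_rhs => rw [dfsList.eq_def]

-- ===== VERDICT (by name: the statement is the Claim_ definition above) =====
theorem dfs_spec : Claim_equal_dfs := by
  intro current visited level levels graph _
  unfold Spec_dfs dfs dfs_alt
  conv_rhs => rw [pvCoreLoop _ _ _ _ _ []]
  rw [dfsLoop.eq_def]
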